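-- pv_equiv track=rewrite | github.com/diegomendieta/projects | Machine Learning/Spotify FP-Growth/arbol.py | fp
-- ===== SOURCE A (Python) =====
-- def potencia(s):
--     if not s:
--         return [[]]
--     return potencia(s[1:]) + [[s[0]] + x for x in potencia(s[1:])]
--
-- def fp(dict):
--     d = {}
--     for id in dict:
--         itemset, count = list(dict[id][0]), dict[id][1]
--         p = potencia(itemset)
--         for conjunto in p:
--             if conjunto:
--                 l = [id]
--                 l.extend(conjunto)
--                 t = tuple(l)
--                 d[t] = count
--     return d
-- ===== SOURCE B (Python) =====
-- def fp(dict):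
--     d = {}
--     for id in dict:
--         itemset, count = list(dict[id][0]), dict[id][1]
--         n = len(itemset)
--         for m in range(1, 2 ** n):
--             key = (id,) + tuple(itemset[i] for i in range(n) if (m // 2 ** (n - 1 - i)) % 2 == 1)
--             d[key] = count
--     return d
-- ===== Notes on version B (the rewrite author's own statement) =====
-- stated objective: alternative
-- what changed: Replaces the recursive power-set doubling (build the full subset list, then skip the empty subset) by an iterative bitmask enumeration: masks 1..2**n-1 are decoded MSB-first into subsets with // and %, so no power-set list is materialized and the empty subset is never produced.
import Mathlib
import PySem

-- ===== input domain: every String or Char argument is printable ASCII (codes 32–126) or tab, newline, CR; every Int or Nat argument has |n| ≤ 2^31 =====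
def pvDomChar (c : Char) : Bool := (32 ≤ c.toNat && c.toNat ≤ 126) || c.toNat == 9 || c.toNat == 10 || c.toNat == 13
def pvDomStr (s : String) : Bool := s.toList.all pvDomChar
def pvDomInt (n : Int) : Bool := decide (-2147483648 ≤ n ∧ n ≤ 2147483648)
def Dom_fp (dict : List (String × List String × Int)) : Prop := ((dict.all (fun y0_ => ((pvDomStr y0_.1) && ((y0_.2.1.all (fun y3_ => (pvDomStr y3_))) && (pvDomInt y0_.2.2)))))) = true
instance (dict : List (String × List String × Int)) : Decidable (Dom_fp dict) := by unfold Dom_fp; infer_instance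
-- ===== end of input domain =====

-- B replaces the recursive power-set doubling by an iterative bitmask enumeration (masks 1..2^n-1
-- decoded MSB-first), never producing the empty subset; equivalence of the returned dicts is proved.

-- ===== PORT A =====
-- potencia(s): two recursive calls exactly as in the Python source
def potencia : List String → List (List String)
  | [] => [[]]
  | a :: s => potencia s ++ (potencia s).map (fun x => a :: x)

-- body of A's outer loop: inner loop over the power set, skipping the empty subset
def fpStep (dict0 : PySem.Dict (List String) Int) (p : String × List String × Int) :
    PySem.Dict (List String) Int :=
  (potencia p.2.1).foldl
    (fun d conjunto =>
      if conjunto ≠ [] then d.insert (p.1 :: conjunto) p.2.2 else d) dict0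

def fp (dict : List (String × List String × Int)) : List (List String × Int) :=
  -- the Python argument is a dict: model it (unique keys, insertion order, last value wins)
  ((PySem.Dict.ofList dict).items.foldl fpStep PySem.Dict.empty).items

-- ===== PORT B =====
-- body of B's outer loop: masks m = 1 .. 2^n - 1; element i of the itemset is selected when
-- (m // 2^(n-1-i)) % 2 == 1 ((n-1-i).toNat is exact: i ranges over 0..n-1, so n-1-i ≥ 0)
def fpAltStep (dict0 : PySem.Dict (List String) Int) (p : String × List String × Int) :
    PySem.Dict (List String) Int :=
  let itemset := p.2.1
  let n : Int := itemset.length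
  (PySem.List.pyRange 1 ((2 ^ itemset.length : Nat) : Int) 1).foldl
    (fun d m =>
      d.insert
        (p.1 ::
          (((PySem.List.pyRange 0 n 1).filter
              (fun i => PySem.Int.mod (PySem.Int.floordiv m (2 ^ ((n - 1 - i).toNat))) 2 == 1)).map
            (fun i => PySem.List.pyGetD itemset i "")))
        p.2.2) dict0

def fp_alt (dict : List (String × List String × Int)) : List (List String × Int) :=
  ((PySem.Dict.ofList dict).items.foldl fpAltStep PySem.Dict.empty).items

-- ===== PRECONDITION & SPEC =====
def Spec_fp (dict : List (String × List String × Int)) (out : List (List String × Int)) : Prop := out = fp_alt dict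
instance (dict : List (String × List String × Int)) (out : List (List String × Int)) : Decidable (Spec_fp dict out) := by unfold Spec_fp; infer_instance

-- ===== CLAIM (what is proved, stated in full; the proofs are below) =====
def Claim_equal_fp : Prop := ∀ (dict : List (String × List String × Int)), Dom_fp dict → Spec_fp dict (fp dict)

-- ===== LEMMAS AND PROOFS =====

-- proof helper: the subset of s selected by mask m, bits read MSB-first
def pvMsel : List String → Nat → List String
  | [], _ => []
  | a :: s, m => (if m / 2 ^ s.length % 2 = 1 then [a] else []) ++ pvMsel s m

theorem pvBit_add_pow (m n k : Nat) (h : k < n) :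
    (m + 2 ^ n) / 2 ^ k % 2 = m / 2 ^ k % 2 := by
  have h1 : 2 ^ n = 2 ^ (n - k) * 2 ^ k := by rw [← pow_add]; congr 1; omega
  have h2 : (m + 2 ^ n) / 2 ^ k = m / 2 ^ k + 2 ^ (n - k) := by
    rw [h1, Nat.add_mul_div_right _ _ (Nat.pos_of_ne_zero (by positivity))]
  have h3 : 2 ^ (n - k) = 2 * 2 ^ (n - k - 1) := by rw [← pow_succ']; congr 1; omega
  omega

theorem pvMsel_add_pow (s : List String) (m n : Nat) (h : s.length ≤ n) :
    pvMsel s (m + 2 ^ n) = pvMsel s m := by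
  induction s with
  | nil => rfl
  | cons a s ih =>
    simp only [List.length_cons] at h
    simp only [pvMsel, pvBit_add_pow m n s.length (by omega), ih (by omega)]

theorem pvMsel_nil_iff (s : List String) (m : Nat) :
    pvMsel s m = [] ↔ m % 2 ^ s.length = 0 := by
  induction s with
  | nil => simp [pvMsel, Nat.mod_one]
  | cons a s ih =>
    have hmod : m % 2 ^ (s.length + 1) = m % 2 ^ s.length + 2 ^ s.length * (m / 2 ^ s.length % 2) := by
      rw [pow_succ, Nat.mod_mul]
    have hpos : 0 < 2 ^ s.length := Nat.pos_of_ne_zero (by positivity)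
    by_cases hb : m / 2 ^ s.length % 2 = 1
    · have hc : pvMsel (a :: s) m = a :: pvMsel s m := by simp [pvMsel, hb]
      rw [hc, List.length_cons]
      rw [hb, Nat.mul_one] at hmod
      have h2 : m % 2 ^ (s.length + 1) ≠ 0 := by omega
      simp [h2]
    · have hb0 : m / 2 ^ s.length % 2 = 0 := by omega
      rw [hb0, Nat.mul_zero, Nat.add_zero] at hmod
      simp [pvMsel, hb, ih, List.length_cons]
      omega

theorem pvPot_eq (s : List String) :
    potencia s = (List.range (2 ^ s.length)).map (pvMsel s) := by
  induction s with
  | nil => rfl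
  | cons a s ih =>
    have hpos : 0 < 2 ^ s.length := Nat.pos_of_ne_zero (by positivity)
    have hsplit : (2 : Nat) ^ (a :: s).length = 2 ^ s.length + 2 ^ s.length := by
      rw [List.length_cons, pow_succ]; ring
    rw [show potencia (a :: s) = potencia s ++ (potencia s).map (fun x => a :: x) from rfl,
        hsplit, List.range_add, List.map_append, List.map_map]
    congr 1
    · rw [ih]
      apply List.map_congr_left
      intro m hm
      have hlt : m < 2 ^ s.length := List.mem_range.mp hm
      have hd : m / 2 ^ s.length = 0 := Nat.div_eq_of_lt hlt
      simp [pvMsel, hd]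
    · rw [ih, List.map_map]
      apply List.map_congr_left
      intro m hm
      have hlt : m < 2 ^ s.length := List.mem_range.mp hm
      have hd1 : (m / 2 ^ s.length + 1) % 2 = 1 := by
        rw [Nat.div_eq_of_lt hlt]
      have hrest : pvMsel s (2 ^ s.length + m) = pvMsel s m := by
        rw [Nat.add_comm]; exact pvMsel_add_pow s m s.length le_rfl
      simp [pvMsel, Function.comp, hd1, hrest]

theorem pvSelNat (s : List String) (m : Nat) :
    ((List.range s.length).filter (fun k => decide (m / 2 ^ (s.length - 1 - k) % 2 = 1))).map
      (fun k => s.getD k "") = pvMsel s m := by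
  induction s with
  | nil => simp [pvMsel]
  | cons a s ih =>
    rw [List.length_cons, List.range_succ_eq_map, List.filter_cons]
    have he0 : s.length + 1 - 1 - 0 = s.length := by omega
    have heS : ∀ k : Nat, s.length + 1 - 1 - Nat.succ k = s.length - 1 - k := by omega
    rw [List.filter_map]
    have hfc : ((List.range s.length).filter
        ((fun k => decide (m / 2 ^ (s.length + 1 - 1 - k) % 2 = 1)) ∘ Nat.succ)) =
        (List.range s.length).filter (fun k => decide (m / 2 ^ (s.length - 1 - k) % 2 = 1)) := by
      apply List.filter_congr
      intro k _
      have : s.length - (k + 1) = s.length - 1 - k := by omega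
      simp [Function.comp, this]
    rw [hfc]
    by_cases hb : m / 2 ^ s.length % 2 = 1
    · rw [he0, if_pos (by simpa using hb)]
      rw [show pvMsel (a :: s) m = a :: pvMsel s m from by simp [pvMsel, hb]]
      rw [← ih]
      simp only [List.map_cons, List.getD_cons_zero, List.map_map]
      congr 1
    · rw [he0, if_neg (by simpa using hb)]
      rw [show pvMsel (a :: s) m = pvMsel s m from by simp [pvMsel, hb]]
      rw [← ih, List.map_map]
      apply List.map_congr_left
      intro k _
      simp [Function.comp]

theorem pvSel_eq (s : List String) (m : Nat) :
    ((PySem.List.pyRange 0 (s.length : Int) 1).filter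
        (fun i => PySem.Int.mod (PySem.Int.floordiv (m : Int) (2 ^ (((s.length : Int) - 1 - i).toNat))) 2 == 1)).map
      (fun i => PySem.List.pyGetD s i "") = pvMsel s m := by
  rw [PySem.List.pyRange_zero_nat, List.filter_map, List.map_map]
  rw [← pvSelNat s m]
  have hfc : ((List.range s.length).filter
      ((fun i => PySem.Int.mod (PySem.Int.floordiv (m : Int) (2 ^ (((s.length : Int) - 1 - i).toNat))) 2 == 1) ∘ (fun k : Nat => (k : Int)))) =
      (List.range s.length).filter (fun k => decide (m / 2 ^ (s.length - 1 - k) % 2 = 1)) := by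
    apply List.filter_congr
    intro k hk
    have ht : (((s.length : Int) - 1 - (k : Int)).toNat) = s.length - 1 - k := by omega
    simp only [Function.comp]
    rw [ht, show ((2 : Int) ^ (s.length - 1 - k)) = (((2 ^ (s.length - 1 - k) : Nat)) : Int) from by push_cast; ring,
       PySem.Int.floordiv_natCast,
       show ((2 : Int)) = (((2 : Nat)) : Int) from by norm_cast,
       PySem.Int.mod_natCast]
    by_cases hx : m / 2 ^ (s.length - 1 - k) % 2 = 1 <;> simp [hx]
    · have h0 : m / 2 ^ (s.length - 1 - k) % 2 = 0 := by omega
      have h1 : ((↑m : Int) / 2 ^ (s.length - 1 - k)) = ((m / 2 ^ (s.length - 1 - k) : Nat) : Int) := by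
        norm_cast
      rw [h1]
      exact_mod_cast Nat.dvd_of_mod_eq_zero h0
  rw [hfc]
  apply List.map_congr_left
  intro k _
  simp [Function.comp, PySem.List.pyGetD_natCast]


theorem pvStep_eq : fpStep = fpAltStep := by
  funext dict0 p
  obtain ⟨id, s, cnt⟩ := p
  unfold fpStep fpAltStep
  have hpos : 0 < 2 ^ s.length := Nat.pos_of_ne_zero (by positivity)
  have hmsel0 : pvMsel s 0 = [] := (pvMsel_nil_iff s 0).mpr (by simp)
  -- left side: power-set fold, mask by mask
  rw [pvPot_eq, List.foldl_map]
  rw [show (2 : Nat) ^ s.length = 1 + (2 ^ s.length - 1) from by omega, List.range_add,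
      List.foldl_append, List.range_one, List.foldl_map]
  simp only [List.foldl_cons, List.foldl_nil, hmsel0, ne_eq, not_true_eq_false, if_false]
  -- right side: pyRange fold
  rw [PySem.List.pyRange_one 1 ((2 ^ s.length : Nat) : Int)]
  rw [show (((2 ^ s.length : Nat) : Int) - 1).toNat = 2 ^ s.length - 1 from by omega]
  rw [List.foldl_map]
  apply PySem.List.foldl_congr_mem'
  intro k hk d
  have hk' : k < 2 ^ s.length - 1 := List.mem_range.mp hk
  have hne : pvMsel s (1 + k) ≠ [] := by
    intro hc
    rw [pvMsel_nil_iff, Nat.mod_eq_of_lt (by omega)] at hc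
    omega
  rw [if_pos hne]
  congr 1
  rw [show ((1 : Int) + (k : Int)) = (((1 + k : Nat)) : Int) from by push_cast; ring]
  rw [pvSel_eq s (1 + k)]

-- ===== VERDICT (by name: the statement is the Claim_ definition above) =====
theorem fp_spec : Claim_equal_fp := by
  intro dict _
  unfold Spec_fp fp fp_alt
  rw [pvStep_eq]
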